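-- pv_equiv track=rewrite | github.com/chenxu0602/LeetCode | 2398.maximum-number-of-robots-within-budget.py | maximumRobots
-- ===== SOURCE A (Python) =====
-- from typing import List
--
-- from collections import deque
--
-- def maximumRobots(chargeTimes: List[int], runningCosts: List[int], budget: int) -> int:
--     """
--     # Time  complexity: O(nlogn)
--     # Space complexity: O(n)
--     cur = i = 0
--     n = len(chargeTimes)
--     s = SortedList()
--     for j in range(n):
--         cur += runningCosts[j]
--         s.add(chargeTimes[j])
--         if s[-1] + (j - i + 1) * cur > budget:
--             s.remove(chargeTimes[i])
--             cur -= runningCosts[i]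
--             i += 1
--     return n - i
--     """
--
--     # Time  complexity: O(n)
--     # Space complexity: O(n)
--     cur = i = 0
--     n = len(chargeTimes)
--     d = deque()
--     for j in range(n):
--         cur += runningCosts[j]
--         while d and chargeTimes[d[-1]] <= chargeTimes[j]:
--             d.pop()
--         d.append(j)
--
--         if chargeTimes[d[0]] + (j - i + 1) * cur > budget:
--             if d[0] == i:
--                 d.popleft()
--             cur -= runningCosts[i]
--             i += 1
--     return n - i
--
--     """
--     def remove_stale(pq, j):
--         while pq and pq[0][1] <= j:
--             heapq.heappop(pq)
--         return -pq[0][0] if pq else 0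
--
--     ans, s, j, pq = 0, 0, -1, []
--     for i in range(len(runningCosts)):
--         s += runningCosts[i]
--         heapq.heappush(pq, (-chargeTimes[i], i))
--         while s * (i - j) + remove_stale(pq, j) > budget:
--             j += 1
--             s -= runningCosts[j]
--
--         ans = max(ans, i - j)
--     return ans
--     """
-- ===== SOURCE B (Python) =====
-- from typing import List
--
-- def maximumRobots(chargeTimes: List[int], runningCosts: List[int], budget: int) -> int:
--     # Same non-shrinking sliding window, but the window maximum is recomputed
--     # directly with max() over the current slice instead of a monotonic deque.
--     cur = i = 0
--     n = len(chargeTimes)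
--     for j in range(n):
--         cur += runningCosts[j]
--         if max(chargeTimes[i:j + 1]) + (j - i + 1) * cur > budget:
--             cur -= runningCosts[i]
--             i += 1
--     return n - i
-- ===== Notes on version B (the rewrite author's own statement) =====
-- stated objective: simpler
-- what changed: Removed the monotonic deque and its index bookkeeping: the window maximum is recomputed directly with max(chargeTimes[i:j+1]) in the same non-shrinking sliding-window loop.
import Mathlib
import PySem

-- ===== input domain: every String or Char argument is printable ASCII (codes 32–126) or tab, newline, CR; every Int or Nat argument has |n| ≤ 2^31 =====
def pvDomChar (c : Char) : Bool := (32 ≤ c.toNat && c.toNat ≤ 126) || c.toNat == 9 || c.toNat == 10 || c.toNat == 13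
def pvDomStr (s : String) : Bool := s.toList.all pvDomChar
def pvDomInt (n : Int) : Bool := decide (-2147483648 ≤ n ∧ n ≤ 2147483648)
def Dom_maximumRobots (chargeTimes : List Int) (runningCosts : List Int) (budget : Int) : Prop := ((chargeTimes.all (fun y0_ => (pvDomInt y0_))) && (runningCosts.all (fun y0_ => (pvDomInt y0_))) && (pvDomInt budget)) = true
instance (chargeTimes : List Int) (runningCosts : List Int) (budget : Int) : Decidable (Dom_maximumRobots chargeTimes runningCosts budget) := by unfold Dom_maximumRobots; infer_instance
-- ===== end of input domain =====

-- B replaces A's monotonic deque by recomputing the window maximum with max() over the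
-- current slice inside the same non-shrinking sliding-window loop (objective: simpler).

-- ===== PORT A =====
-- `while d and chargeTimes[d[-1]] <= chargeTimes[j]: d.pop()` — structural recursion
-- popping from the back of the deque (back = last element of the list).
def pvPopBack (p : Nat → Bool) : List Nat → List Nat
  | [] => []
  | k :: ks =>
    match pvPopBack p ks with
    | [] => if p k then [] else [k]
    | l => k :: l

-- one iteration of A's `for j in range(n)` body; state = (cur, i, d).
-- `runningCosts[j]` / `runningCosts[i]` are getD: in range whenever Pre_ holds (else Python raises IndexError).
def pvStepA (c r : List Int) (budget : Int) (st : Int × Nat × List Nat) (j : Nat) : Int × Nat × List Nat :=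
  let cur := st.1 + r.getD j 0
  let i := st.2.1
  let d := pvPopBack (fun k => decide (c.getD k 0 ≤ c.getD j 0)) st.2.2 ++ [j]
  if c.getD (d.headD 0) 0 + ((j : Int) - (i : Int) + 1) * cur > budget then
    (cur - r.getD i 0, i + 1, if d.headD 0 = i then d.tail else d)
  else
    (cur, i, d)

def maximumRobots (chargeTimes : List Int) (runningCosts : List Int) (budget : Int) : Int :=
  let n := chargeTimes.length
  let st := (List.range n).foldl (pvStepA chargeTimes runningCosts budget) (0, 0, ([] : List Nat))
  (n : Int) - (st.2.1 : Int)

-- ===== PORT B =====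
-- one iteration of B's loop body; state = (cur, i); `max(chargeTimes[i:j+1])` via PySem
-- slice + max? (the slice is never empty inside the loop, so the getD default is unreachable).
def pvStepB (c r : List Int) (budget : Int) (st : Int × Nat) (j : Nat) : Int × Nat :=
  let cur := st.1 + r.getD j 0
  let i := st.2
  let m := (PySem.List.max? (PySem.List.slice c (some (i : Int)) (some ((j : Int) + 1))) (fun x => x)).getD 0
  if m + ((j : Int) - (i : Int) + 1) * cur > budget then
    (cur - r.getD i 0, i + 1)
  else
    (cur, i)

def maximumRobots_alt (chargeTimes : List Int) (runningCosts : List Int) (budget : Int) : Int :=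
  let n := chargeTimes.length
  let st := (List.range n).foldl (pvStepB chargeTimes runningCosts budget) (0, 0)
  (n : Int) - (st.2 : Int)

-- ===== PRECONDITION & SPEC =====
-- Pre_ excludes inputs where runningCosts is shorter than chargeTimes, on which the Python
-- (A and B alike) raises IndexError at runningCosts[j].
def Pre_maximumRobots (chargeTimes : List Int) (runningCosts : List Int) (budget : Int) : Prop :=
  chargeTimes.length ≤ runningCosts.length
instance (chargeTimes : List Int) (runningCosts : List Int) (budget : Int) : Decidable (Pre_maximumRobots chargeTimes runningCosts budget) := by unfold Pre_maximumRobots; infer_instance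

def pvWitness_maximumRobots : List Int × List Int × Int := ([3, 6, 1, 3, 4], [2, 1, 3, 4, 5], 25)

def Spec_maximumRobots (chargeTimes : List Int) (runningCosts : List Int) (budget : Int) (out : Int) : Prop := out = maximumRobots_alt chargeTimes runningCosts budget
instance (chargeTimes : List Int) (runningCosts : List Int) (budget : Int) (out : Int) : Decidable (Spec_maximumRobots chargeTimes runningCosts budget out) := by unfold Spec_maximumRobots; infer_instance

-- ===== CLAIM (what is proved, stated in full; the proofs are below) =====
def Claim_equal_maximumRobots : Prop := ∀ (chargeTimes : List Int) (runningCosts : List Int) (budget : Int), Dom_maximumRobots chargeTimes runningCosts budget → Pre_maximumRobots chargeTimes runningCosts budget → Spec_maximumRobots chargeTimes runningCosts budget (maximumRobots chargeTimes runningCosts budget)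

-- ===== LEMMAS AND PROOFS =====

-- The deque invariant: `pvInv c i t d` says d is A's deque for window [i, t):
-- its head k lies in the window, dominates every window element, and the tail
-- is the deque of the window [k+1, t).
def pvInv (c : List Int) : Nat → Nat → List Nat → Prop
  | i, t, [] => i = t
  | i, t, k :: ks => i ≤ k ∧ k < t ∧ (∀ m, i ≤ m → m < t → c.getD m 0 ≤ c.getD k 0) ∧ pvInv c (k + 1) t ks

theorem Inv_mem (c : List Int) (d : List Nat) : ∀ i t, pvInv c i t d → ∀ x ∈ d, i ≤ x ∧ x < t := by
  induction d with
  | nil => intro i t _ x hx; cases hx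
  | cons k ks ih =>
    intro i t h x hx
    obtain ⟨h1, h2, _, h4⟩ := h
    rcases List.mem_cons.1 hx with rfl | hx
    · exact ⟨h1, h2⟩
    · have := ih (k + 1) t h4 x hx
      exact ⟨by omega, this.2⟩

theorem pvPopBack_eq_nil (p : Nat → Bool) (l : List Nat) :
    pvPopBack p l = [] ↔ ∀ x ∈ l, p x = true := by
  induction l with
  | nil => simp [pvPopBack]
  | cons k ks ih =>
    simp only [pvPopBack]
    cases hpb : pvPopBack p ks with
    | nil =>
      by_cases hk : p k = true
      · simp only [hk, if_pos]
        constructor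
        · intro _ x hx
          rcases List.mem_cons.1 hx with rfl | hx
          · exact hk
          · exact (ih.1 hpb) x hx
        · intro _; trivial
      · simp only [hk]
        constructor
        · intro h; cases h
        · intro h; exact absurd (h k (List.mem_cons_self)) hk
    | cons y ys =>
      constructor
      · intro h; cases h
      · intro h
        have : pvPopBack p ks = [] := ih.2 fun x hx => h x (List.mem_cons_of_mem _ hx)
        rw [this] at hpb; cases hpb

theorem Inv_step (c : List Int) (t : Nat) (d : List Nat) : ∀ i, pvInv c i t d →
    pvInv c i (t + 1) (pvPopBack (fun k => decide (c.getD k 0 ≤ c.getD t 0)) d ++ [t]) := by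
  induction d with
  | nil =>
    intro i h
    have hit : i = t := h
    refine ⟨le_of_eq hit, by omega, ?_, rfl⟩
    intro m h1 h2
    have hm : m = t := by omega
    rw [hm]
  | cons k ks ih =>
    intro i h
    obtain ⟨h1, h2, h3, h4⟩ := h
    have ihk := ih (k + 1) h4
    simp only [pvPopBack]
    cases hpb : pvPopBack (fun k => decide (c.getD k 0 ≤ c.getD t 0)) ks with
    | nil =>
      rw [hpb] at ihk
      by_cases hk : c.getD k 0 ≤ c.getD t 0
      · simp only [hk, decide_true, if_pos, List.nil_append]
        refine ⟨by omega, by omega, ?_, rfl⟩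
        intro m hm1 hm2
        by_cases hmt : m = t
        · subst hmt; exact le_refl _
        · exact le_trans (h3 m hm1 (by omega)) hk
      · simp only [hk, decide_false, if_neg, Bool.false_eq_true, not_false_iff, List.cons_append,
          List.nil_append]
        refine ⟨h1, by omega, ?_, ihk⟩
        intro m hm1 hm2
        by_cases hmt : m = t
        · subst hmt; omega
        · exact h3 m hm1 (by omega)
    | cons y ys =>
      rw [hpb] at ihk
      simp only [List.cons_append]
      refine ⟨h1, by omega, ?_, ihk⟩
      intro m hm1 hm2
      by_cases hmt : m = t
      · -- some surviving element of ks is > c[t], and it is ≤ c[k]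
        have hne : pvPopBack (fun k => decide (c.getD k 0 ≤ c.getD t 0)) ks ≠ [] := by
          rw [hpb]; simp
        have hex : ∃ x ∈ ks, c.getD t 0 < c.getD x 0 := by
          by_contra hall
          push Not at hall
          exact hne ((pvPopBack_eq_nil _ _).2 (fun x hx => by simpa using hall x hx))
        obtain ⟨x, hxmem, hx⟩ := hex
        have hxw := Inv_mem c ks (k + 1) t h4 x hxmem
        have := h3 x (by omega) hxw.2
        rw [hmt]
        omega
      · exact h3 m hm1 (by omega)

-- membership in the window slice
theorem mem_window_slice (c : List Int) (i t : Nat) (hit : i < t) (htn : t ≤ c.length) :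
    ∀ x, x ∈ (c.drop i).take (t - i) ↔ ∃ m, i ≤ m ∧ m < t ∧ x = c.getD m 0 := by
  intro x
  constructor
  · intro hx
    obtain ⟨p, hp, hget⟩ := List.mem_iff_getElem.1 hx
    have hplen : p < t - i := by
      have := hp
      simp only [List.length_take, List.length_drop] at this
      omega
    have hpi : i + p < c.length := by omega
    refine ⟨i + p, by omega, by omega, ?_⟩
    rw [List.getElem_take, List.getElem_drop] at hget
    rw [List.getD_eq_getElem c 0 hpi, ← hget]
  · rintro ⟨m, hm1, hm2, rfl⟩
    have hmlen : m < c.length := by omega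
    rw [List.getD_eq_getElem c 0 hmlen]
    apply List.mem_iff_getElem.2
    refine ⟨m - i, ?_, ?_⟩
    · simp only [List.length_take, List.length_drop]; omega
    · rw [List.getElem_take, List.getElem_drop]
      congr 1; omega

-- head of the deque = B's max over the window slice
theorem head_eq_windowMax (c : List Int) (i t k : Nat) (ks : List Nat)
    (h : pvInv c i t (k :: ks)) (htn : t ≤ c.length) :
    (PySem.List.max? (PySem.List.slice c (some (i : Int)) (some (t : Int))) (fun x => x)).getD 0
      = c.getD k 0 := by
  obtain ⟨h1, h2, h3, _⟩ := h
  have hslice : PySem.List.slice c (some (i : Int)) (some (t : Int)) = (c.drop i).take (t - i) :=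
    PySem.List.slice_natCast c i t
  have hit : i < t := by omega
  have hmemk : c.getD k 0 ∈ (c.drop i).take (t - i) :=
    (mem_window_slice c i t hit htn _).2 ⟨k, h1, h2, rfl⟩
  cases hmx : PySem.List.max? (PySem.List.slice c (some (i : Int)) (some (t : Int))) (fun x => x) with
  | none =>
    rw [PySem.List.max?_eq_none_iff] at hmx
    rw [hslice] at hmx
    rw [hmx] at hmemk
    cases hmemk
  | some mx =>
    have hmxmem : mx ∈ (c.drop i).take (t - i) := by
      have := PySem.List.max?_mem hmx; rwa [hslice] at this
    obtain ⟨m, hm1, hm2, rfl⟩ := (mem_window_slice c i t hit htn _).1 hmxmem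
    have hle1 : c.getD m 0 ≤ c.getD k 0 := h3 m hm1 hm2
    have hle2 : c.getD k 0 ≤ c.getD m 0 := by
      have := PySem.List.max?_isMax hmx (c.getD k 0) (by rwa [hslice])
      exact this
    simp only [Option.getD_some]
    omega

-- the main simulation: after t steps the two folds carry the same (cur, i),
-- the deque satisfies pvInv, and i ≤ t.
theorem sim (c r : List Int) (budget : Int) : ∀ t, t ≤ c.length →
    ((List.range t).foldl (pvStepA c r budget) (0, 0, ([] : List Nat))).1
      = ((List.range t).foldl (pvStepB c r budget) (0, 0)).1 ∧
    ((List.range t).foldl (pvStepA c r budget) (0, 0, ([] : List Nat))).2.1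
      = ((List.range t).foldl (pvStepB c r budget) (0, 0)).2 ∧
    pvInv c ((List.range t).foldl (pvStepA c r budget) (0, 0, ([] : List Nat))).2.1 t
      ((List.range t).foldl (pvStepA c r budget) (0, 0, ([] : List Nat))).2.2 ∧
    ((List.range t).foldl (pvStepA c r budget) (0, 0, ([] : List Nat))).2.1 ≤ t := by
  intro t
  induction t with
  | zero => intro _; exact ⟨rfl, rfl, rfl, le_refl _⟩
  | succ t ih =>
    intro htn
    have ih' := ih (by omega)
    obtain ⟨hcur, hi, hinv, hit⟩ := ih'
    rw [List.range_succ, List.foldl_append, List.foldl_append]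
    set stA := (List.range t).foldl (pvStepA c r budget) (0, 0, ([] : List Nat)) with hstA
    set stB := (List.range t).foldl (pvStepB c r budget) (0, 0) with hstB
    simp only [List.foldl_cons, List.foldl_nil]
    -- the updated deque after pops and append
    set d' := pvPopBack (fun k => decide (c.getD k 0 ≤ c.getD t 0)) stA.2.2 ++ [t] with hd'
    have hinv' : pvInv c stA.2.1 (t + 1) d' := Inv_step c t stA.2.2 stA.2.1 hinv
    obtain ⟨k, ks, hkks⟩ : ∃ k ks, d' = k :: ks := by
      cases hcase : d' with
      | nil => exact absurd (hd' ▸ hcase) (by simp)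
      | cons k ks => exact ⟨k, ks, rfl⟩
    have hhead : d'.headD 0 = k := by rw [hkks]; rfl
    have hmax : (PySem.List.max? (PySem.List.slice c (some (stA.2.1 : Int)) (some ((t : Int) + 1)))
        (fun x => x)).getD 0 = c.getD k 0 := by
      have : ((t : Int) + 1) = ((t + 1 : Nat) : Int) := by push_cast; ring
      rw [this]
      exact head_eq_windowMax c stA.2.1 (t + 1) k ks (hkks ▸ hinv') htn
    simp only [pvStepA, pvStepB, ← hd', hhead, ← hcur, ← hi]
    rw [hmax]
    by_cases hcond : c.getD k 0 + ((t : Int) - (stA.2.1 : Int) + 1) * (stA.1 + r.getD t 0) > budget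
    · simp only [if_pos hcond]
      refine ⟨by trivial, by trivial, ?_, by omega⟩
      have h' := hkks ▸ hinv'
      obtain ⟨g1, g2, g3, g4⟩ := h'
      by_cases hki : k = stA.2.1
      · rw [if_pos hki, hkks, List.tail_cons]
        exact hki ▸ g4
      · rw [if_neg hki, hkks]
        exact ⟨by omega, g2, fun m hm1 hm2 => g3 m (by omega) hm2, g4⟩
    · simp only [if_neg hcond]
      exact ⟨by trivial, by trivial, hinv', by omega⟩

-- ===== VERDICT (by name: the statement is the Claim_ definition above) =====
theorem maximumRobots_spec : Claim_equal_maximumRobots := by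
  intro c r budget _ _
  unfold Spec_maximumRobots maximumRobots maximumRobots_alt
  have h := sim c r budget c.length (le_refl _)
  simp only []
  rw [h.2.1]
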